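-- pv_equiv track=rewrite | github.com/pazyn404/Algo | subarray_sum.py | count3
-- ===== SOURCE A (Python) =====
-- from bisect import bisect_left
--
-- def helper(l: list[int], pos: int, sub_range: int) -> int:
--     new_pos = bisect_left(l, pos - sub_range)
--     return len(l) - new_pos
--
-- def count3(l: list[int], target: int, sub_range: int) -> int:
--     res = 0
--     #
--     curr_sum = 0
--     d = {0: [0]}
--
--     for i, num in enumerate(l):
--         curr_sum += num
--         res += helper(d.get(curr_sum - target, []), i, sub_range)
--         if curr_sum in d:
--             d[curr_sum].append(i)
--         else:
--             d[curr_sum] = [i]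
--     #
--     return res
-- ===== SOURCE B (Python) =====
-- def count3(l: list[int], target: int, sub_range: int) -> int:
--     # One pass, O(n): sliding-window counter of prefix sums instead of
--     # per-sum sorted index lists with bisect.
--     res = 0
--     curr_sum = 0
--     cnt = {0: 1}
--     window = [(0, 0)]  # (index, prefix sum), indices nondecreasing
--     head = 0
--     for i, num in enumerate(l):
--         curr_sum += num
--         while head < len(window) and window[head][0] < i - sub_range:
--             cnt[window[head][1]] -= 1
--             head += 1
--         res += cnt.get(curr_sum - target, 0)
--         cnt[curr_sum] = cnt.get(curr_sum, 0) + 1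
--         window.append((i, curr_sum))
--     return res
-- ===== Notes on version B (the rewrite author's own statement) =====
-- stated objective: alternative
-- what changed: Replaced the dict of per-prefix-sum sorted index lists queried with bisect_left by a single-pass sliding-window counter of prefix sums whose stale entries are evicted with an advancing head pointer, so no per-step binary search or per-sum lists are kept.
import Mathlib
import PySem

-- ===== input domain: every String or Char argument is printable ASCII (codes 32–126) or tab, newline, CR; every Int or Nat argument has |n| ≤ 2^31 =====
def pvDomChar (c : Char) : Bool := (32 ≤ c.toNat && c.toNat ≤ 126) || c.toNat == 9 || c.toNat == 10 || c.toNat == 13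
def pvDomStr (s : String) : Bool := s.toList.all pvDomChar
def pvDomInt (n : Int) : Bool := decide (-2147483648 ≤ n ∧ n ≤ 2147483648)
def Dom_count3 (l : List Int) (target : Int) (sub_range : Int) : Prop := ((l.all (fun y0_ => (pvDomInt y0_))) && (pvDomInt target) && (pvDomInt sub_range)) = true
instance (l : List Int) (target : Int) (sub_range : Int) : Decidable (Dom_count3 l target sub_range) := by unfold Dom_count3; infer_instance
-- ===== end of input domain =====

-- B replaces A's dict of per-sum index lists queried with bisect by a single-pass
-- sliding-window counter of prefix sums with pointer-based eviction (alternative algorithm).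

-- ===== PORT A =====
-- helper(l, pos, sub_range): len(l) - bisect_left(l, pos - sub_range)
def helperA (lst : List Int) (pos : Int) (sub_range : Int) : Int :=
  let new_pos := PySem.List.bisectLeft lst (pos - sub_range)
  (lst.length : Int) - (new_pos : Int)

-- one iteration of A's for-loop; state = (i, res, curr_sum, d)
def stepA (target sub_range : Int)
    (st : Int × Int × Int × PySem.Dict Int (List Int)) (num : Int) :
    Int × Int × Int × PySem.Dict Int (List Int) :=
  let i := st.1
  let curr_sum := st.2.2.1 + num
  let res := st.2.1 + helperA (st.2.2.2.getD (curr_sum - target) []) i sub_range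
  let d := if st.2.2.2.contains curr_sum
           then st.2.2.2.modify curr_sum [] (fun v => v ++ [i])   -- d[curr_sum].append(i)
           else st.2.2.2.insert curr_sum [i]                      -- d[curr_sum] = [i]
  (i + 1, res, curr_sum, d)

def count3 (l : List Int) (target : Int) (sub_range : Int) : Int :=
  (l.foldl (stepA target sub_range) (0, 0, 0, PySem.Dict.empty.insert 0 [0])).2.1

-- ===== PORT B =====
-- Source B's while-loop: advance head past window entries with index < thr, decrementing cnt
def evictB (window : List (Int × Int)) (thr : Int) (head : Nat) (cnt : PySem.Dict Int Int) :
    Nat × PySem.Dict Int Int :=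
  match h : window[head]? with
  | some e =>
      if e.1 < thr then
        evictB window thr (head + 1) (cnt.modify e.2 0 (fun v => v - 1))
      else (head, cnt)
  | none => (head, cnt)
  termination_by window.length - head
  decreasing_by
    obtain ⟨hlt, -⟩ := List.getElem?_eq_some_iff.mp h
    omega

-- one iteration of Source B's for-loop; state = (i, res, curr_sum, cnt, window, head)
def stepB (target sub_range : Int)
    (st : Int × Int × Int × PySem.Dict Int Int × List (Int × Int) × Nat) (num : Int) :
    Int × Int × Int × PySem.Dict Int Int × List (Int × Int) × Nat :=
  let i := st.1
  let curr_sum := st.2.2.1 + num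
  let hc := evictB st.2.2.2.2.1 (i - sub_range) st.2.2.2.2.2 st.2.2.2.1
  let res := st.2.1 + (hc.2.getD (curr_sum - target) 0)
  let cnt := hc.2.insert curr_sum (hc.2.getD curr_sum 0 + 1)
  (i + 1, res, curr_sum, cnt, st.2.2.2.2.1 ++ [(i, curr_sum)], hc.1)

def count3_alt (l : List Int) (target : Int) (sub_range : Int) : Int :=
  (l.foldl (stepB target sub_range) (0, 0, 0, PySem.Dict.empty.insert 0 1, [(0, 0)], 0)).2.1

-- ===== PRECONDITION & SPEC =====
def Spec_count3 (l : List Int) (target : Int) (sub_range : Int) (out : Int) : Prop := out = count3_alt l target sub_range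
instance (l : List Int) (target : Int) (sub_range : Int) (out : Int) : Decidable (Spec_count3 l target sub_range out) := by unfold Spec_count3; infer_instance

-- ===== CLAIM (what is proved, stated in full; the proofs are below) =====
def Claim_equal_count3 : Prop := ∀ (l : List Int) (target : Int) (sub_range : Int), Dom_count3 l target sub_range → Spec_count3 l target sub_range (count3 l target sub_range)

-- ===== LEMMAS AND PROOFS =====

-- the coupling invariant between A's dict state and B's (cnt, window, head) state,
-- entering the loop iteration with counter i
def CInv (sub_range i : Int) (d : PySem.Dict Int (List Int)) (cnt : PySem.Dict Int Int)
    (window : List (Int × Int)) (head : Nat) : Prop :=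
  head ≤ window.length ∧
  (∀ j (hj : j < window.length), j < head → (window[j]).1 < i - sub_range) ∧
  (∀ s, d.getD s [] = (window.filter (fun e => e.2 == s)).map Prod.fst) ∧
  (∀ s, cnt.getD s 0 = (((window.drop head).filter (fun e => e.2 == s)).length : Int)) ∧
  window.Pairwise (fun a b => a.1 ≤ b.1) ∧
  (∀ e ∈ window, e.1 ≤ i)

theorem evictB_spec (window : List (Int × Int)) (thr : Int) :
    ∀ (head : Nat) (cnt : PySem.Dict Int Int),
    head ≤ window.length →
    (∀ j (hj : j < window.length), j < head → (window[j]).1 < thr) →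
    (∀ s, cnt.getD s 0 = (((window.drop head).filter (fun e => e.2 == s)).length : Int)) →
    (evictB window thr head cnt).1 ≤ window.length ∧
    (∀ j (hj : j < window.length), j < (evictB window thr head cnt).1 → (window[j]).1 < thr) ∧
    (∀ s, (evictB window thr head cnt).2.getD s 0
        = (((window.drop (evictB window thr head cnt).1).filter (fun e => e.2 == s)).length : Int)) ∧
    (∀ (hlt : (evictB window thr head cnt).1 < window.length),
        thr ≤ (window[(evictB window thr head cnt).1]).1) := by
  intro head cnt
  fun_induction evictB window thr head cnt with
  | case1 head cnt e h hlt ih =>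
    intro hle hbef hcnt
    obtain ⟨hl, he⟩ := List.getElem?_eq_some_iff.mp h
    have hdrop : window.drop head = window[head] :: window.drop (head + 1) :=
      List.drop_eq_getElem_cons hl
    apply ih
    · omega
    · intro j hj hj2
      rcases Nat.lt_or_ge j head with hc | hc
      · exact hbef j hj hc
      · have : j = head := by omega
        subst this; rw [he]; exact hlt
    · intro s
      rw [PySem.Dict.getD_modify]
      have hc := hcnt s
      rw [hdrop, List.filter_cons] at hc
      by_cases hs : s = e.2
      · subst hs
        rw [he] at hc
        rw [if_pos (show (e.2 == e.2) = true by simp)] at hc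
        simp only [List.length_cons] at hc
        rw [if_pos rfl]
        omega
      · rw [if_neg hs]
        rw [he] at hc
        rw [if_neg (show ¬((e.2 == s) = true) by simp; exact fun hh => hs hh.symm)] at hc
        exact hc
  | case2 head cnt e h hge =>
    intro hle hbef hcnt
    obtain ⟨hl, he⟩ := List.getElem?_eq_some_iff.mp h
    refine ⟨hle, hbef, hcnt, ?_⟩
    intro hlt2
    rw [he]
    omega
  | case3 head cnt h =>
    intro hle hbef hcnt
    have : window.length ≤ head := by
      have := List.getElem?_eq_none_iff.mp h
      omega
    refine ⟨hle, hbef, hcnt, ?_⟩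
    intro hlt2
    omega

theorem bisect_count (xs : List Int) (x : Int) (h : xs.Pairwise (· ≤ ·)) :
    (xs.length : Int) - (PySem.List.bisectLeft xs x : Int)
      = ((xs.filter (fun a => decide (x ≤ a))).length : Int) := by
  obtain ⟨h1, h2, h3⟩ := PySem.List.bisectLeft_spec xs x h
  have hfilter : xs.filter (fun a => decide (x ≤ a)) = xs.drop (PySem.List.bisectLeft xs x) := by
    conv_lhs => rw [← List.take_append_drop (PySem.List.bisectLeft xs x) xs]
    rw [List.filter_append]
    have h4 : (xs.take (PySem.List.bisectLeft xs x)).filter (fun a => decide (x ≤ a)) = [] := by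
      rw [List.filter_eq_nil_iff]
      intro a ha
      rw [List.mem_take_iff_getElem] at ha
      obtain ⟨j, hj, rfl⟩ := ha
      have := h2 j (by omega) (by omega)
      simpa using not_le.mpr this
    have h5 : (xs.drop (PySem.List.bisectLeft xs x)).filter (fun a => decide (x ≤ a))
        = xs.drop (PySem.List.bisectLeft xs x) := by
      rw [List.filter_eq_self]
      intro a ha
      rw [List.mem_iff_getElem] at ha
      obtain ⟨j, hj, rfl⟩ := ha
      rw [List.getElem_drop]
      simp only [decide_eq_true_eq]
      exact h3 _ (by simp at hj; omega) (by omega)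
    rw [h4, h5, List.nil_append]
  rw [hfilter, List.length_drop]
  omega

-- on a fst-sorted window, the live-suffix count equals the count with an explicit
-- index-threshold condition over the whole window
theorem drop_count_eq (window : List (Int × Int)) (thr s : Int) (head : Nat)
    (hle : head ≤ window.length)
    (hbef : ∀ j (hj : j < window.length), j < head → (window[j]).1 < thr)
    (hpw : window.Pairwise (fun a b => a.1 ≤ b.1))
    (hbound : ∀ (hlt : head < window.length), thr ≤ (window[head]).1) :
    ((window.drop head).filter (fun e => e.2 == s)).length
      = (window.filter (fun e => (e.2 == s) && decide (thr ≤ e.1))).length := by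
  conv_rhs => rw [← List.take_append_drop head window]
  rw [List.filter_append, List.length_append]
  have h4 : (window.take head).filter (fun e => (e.2 == s) && decide (thr ≤ e.1)) = [] := by
    rw [List.filter_eq_nil_iff]
    intro e he
    rw [List.mem_take_iff_getElem] at he
    obtain ⟨j, hj, rfl⟩ := he
    have := hbef j (by omega) (by omega)
    simp [not_le.mpr this]
  have h5 : (window.drop head).filter (fun e => (e.2 == s) && decide (thr ≤ e.1))
      = (window.drop head).filter (fun e => e.2 == s) := by
    apply List.filter_congr
    intro e he
    rw [List.mem_iff_getElem] at he
    obtain ⟨j, hj, rfl⟩ := he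
    have hjlen : head + j < window.length := by simp at hj; omega
    rw [List.getElem_drop]
    have hthr : thr ≤ (window[head + j]).1 := by
      have h0 := hbound (by omega)
      rcases Nat.eq_or_lt_of_le (Nat.le_add_right head j) with heq | hlt
      · have hj0 : j = 0 := by omega
        subst hj0; simpa using h0
      · exact le_trans h0 ((List.pairwise_iff_getElem.mp hpw) head (head + j) (by omega) hjlen hlt)
    simp [hthr]
  rw [h4, h5]
  simp

theorem loop_eq (target sub_range : Int) :
    ∀ (l : List Int) (i res cs : Int) (d : PySem.Dict Int (List Int))
      (cnt : PySem.Dict Int Int) (window : List (Int × Int)) (head : Nat),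
    CInv sub_range i d cnt window head →
    (l.foldl (stepA target sub_range) (i, res, cs, d)).2.1
      = (l.foldl (stepB target sub_range) (i, res, cs, cnt, window, head)).2.1 := by
  intro l
  induction l with
  | nil => intro i res cs d cnt window head _; rfl
  | cons num l ih =>
    intro i res cs d cnt window head hinv
    obtain ⟨hle, hbef, hd, hcnt, hpw, hub⟩ := hinv
    obtain ⟨e1, e2, e3, e4⟩ := evictB_spec window (i - sub_range) head cnt hle hbef hcnt
    simp only [List.foldl_cons, stepA, stepB]
    -- the two per-step increments agree
    have hAB : helperA (d.getD (cs + num - target) []) i sub_range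
        = (evictB window (i - sub_range) head cnt).2.getD (cs + num - target) 0 := by
      rw [hd, e3]
      have hsorted : ((window.filter (fun e => e.2 == (cs + num - target))).map Prod.fst).Pairwise
          (fun a b => a ≤ b) := by
        apply List.Pairwise.map
        · exact fun a b hab => hab
        · exact hpw.sublist List.filter_sublist
      show (((window.filter (fun e => e.2 == (cs + num - target))).map Prod.fst).length : Int)
          - _ = _
      rw [bisect_count _ (i - sub_range) hsorted]
      rw [List.filter_map, List.length_map, List.filter_filter]
      rw [drop_count_eq window (i - sub_range) (cs + num - target) _ e1 e2 hpw e4]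
      congr 2
      exact List.filter_congr (fun a _ => by simp [Function.comp, Bool.and_comm])
    rw [hAB]
    apply ih
    -- re-establish the invariant at i + 1
    refine ⟨?_, ?_, ?_, ?_, ?_, ?_⟩
    · rw [List.length_append]; simp; omega
    · intro j hj hj2
      have hjw : j < window.length := by omega
      rw [List.getElem_append_left hjw]
      have := e2 j hjw hj2
      omega
    · intro s'
      rw [List.filter_append, List.map_append]
      have hsing : (List.filter (fun e => e.2 == s') [((i : Int), cs + num)]).map Prod.fst
          = if s' = cs + num then [i] else [] := by
        by_cases hs' : s' = cs + num
        · subst hs'; simp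
        · have hb : ((cs + num : Int) == s') = false := by
            simp; exact fun hh => hs' hh.symm
          simp [List.filter, hb, hs']
      rw [hsing]
      by_cases hs' : s' = cs + num
      · rw [if_pos hs']
        subst hs'
        by_cases hctn : d.contains (cs + num) = true
        · rw [if_pos hctn, PySem.Dict.getD_modify, if_pos rfl, hd]
        · rw [if_neg hctn, PySem.Dict.getD_insert, if_pos rfl]
          have h0 : d.getD (cs + num) [] = [] :=
            PySem.Dict.getD_of_not_contains _ _ (by simpa using hctn)
          rw [← hd, h0]
          simp
      · rw [if_neg hs']
        by_cases hctn : d.contains (cs + num) = true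
        · rw [if_pos hctn, PySem.Dict.getD_modify, if_neg hs', hd, List.append_nil]
        · rw [if_neg hctn, PySem.Dict.getD_insert, if_neg hs', hd, List.append_nil]
    · intro s'
      rw [PySem.Dict.getD_insert, List.drop_append_of_le_length e1, List.filter_append,
          List.length_append]
      by_cases hs' : s' = cs + num
      · rw [if_pos hs', e3]
        subst hs'
        simp [List.filter]
      · rw [if_neg hs', e3]
        have : ((cs + num : Int) == s') = false := by
          simp; exact fun hh => hs' hh.symm
        simp [List.filter, this]
    · rw [List.pairwise_append]
      refine ⟨hpw, by simp, ?_⟩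
      intro a ha b hb
      simp only [List.mem_singleton] at hb
      subst hb
      exact hub a ha
    · intro e he
      rcases List.mem_append.mp he with h | h
      · have := hub e h; omega
      · simp only [List.mem_singleton] at h
        subst h
        simp

-- ===== VERDICT (by name: the statement is the Claim_ definition above) =====
theorem count3_spec : Claim_equal_count3 := by
  intro l target sub_range _
  unfold Spec_count3 count3 count3_alt
  apply loop_eq
  refine ⟨by simp, by omega, ?_, ?_, by simp, by simp⟩
  · intro s
    rw [PySem.Dict.getD_insert]
    by_cases hs : s = 0
    · subst hs; simp
    · rw [if_neg hs]
      rw [PySem.Dict.getD_empty]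
      have : ((0 : Int) == s) = false := by simp; exact fun hh => hs hh.symm
      simp [List.filter, this]
  · intro s
    rw [PySem.Dict.getD_insert]
    by_cases hs : s = 0
    · subst hs; simp
    · rw [if_neg hs]
      rw [PySem.Dict.getD_empty]
      have : ((0 : Int) == s) = false := by simp; exact fun hh => hs hh.symm
      simp [List.filter, this]
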